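-- pv_equiv track=rewrite | github.com/posl/comment_recommendation | script/mod_gen/2_time/zh/125_D/0.py | solve
-- ===== SOURCE A (Python) =====
-- def solve(n, a):
--     ans = 0
--     minus = 0
--     min_abs = 10**9
--     for i in range(n):
--         if a[i] < 0:
--             minus += 1
--         ans += abs(a[i])
--         min_abs = min(min_abs, abs(a[i]))
--     if minus % 2 == 0:
--         return ans
--     else:
--         return ans - 2 * min_abs
-- ===== SOURCE B (Python) =====
-- def solve(n, a):
--     vals = [a[i] for i in range(n)]
--     mags = sorted(abs(v) for v in vals)
--     if sum(v < 0 for v in vals) % 2: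
--         return sum(mags) - 2 * mags[0]
--     return sum(mags)
-- ===== Notes on version B (the rewrite author's own statement) =====
-- stated objective: alternative
-- what changed: Replaces A's single fused loop carrying (ans, minus, min_abs) running state by a sort-based pipeline: materialize the prefix, sort its absolute values, sum the sorted list, and read the minimum off as the first element of the sorted list instead of maintaining a running min with a 10**9 sentinel.
-- intended difference: When the count of negatives among a[0..n-1] is odd and every |a[i]| exceeds 10**9, A's sentinel-initialised min_abs stays 10**9 so A returns ans - 2*10**9, while B subtracts twice the true minimum absolute value (the head of the sorted magnitudes), which is the intended answer. — e.g. on solve(1, [-2000000000]): A returns 0, B returns -2000000000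
import Mathlib
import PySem

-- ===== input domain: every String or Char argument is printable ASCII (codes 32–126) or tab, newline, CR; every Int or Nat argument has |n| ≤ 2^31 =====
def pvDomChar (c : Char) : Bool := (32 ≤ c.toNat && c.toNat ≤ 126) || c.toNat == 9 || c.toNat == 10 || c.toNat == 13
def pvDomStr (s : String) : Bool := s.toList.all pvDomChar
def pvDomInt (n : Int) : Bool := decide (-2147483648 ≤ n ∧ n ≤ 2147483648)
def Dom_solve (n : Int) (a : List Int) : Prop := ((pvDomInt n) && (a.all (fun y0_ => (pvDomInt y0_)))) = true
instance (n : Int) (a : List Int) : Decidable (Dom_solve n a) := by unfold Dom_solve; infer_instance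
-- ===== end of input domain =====

-- B replaces A's fused running-state loop by a sort-based pipeline (sort the absolute values,
-- the minimum is the first element of the sorted list); objective: alternative, not faster.

-- ===== PORT A =====
def solve (n : Int) (a : List Int) : Int :=
  let st := (PySem.List.pyRange 0 n 1).foldl
    (fun (s : Int × Int × Int) i =>
      let ai := PySem.List.pyGetD a i 0
      let minus := if ai < 0 then s.2.1 + 1 else s.2.1
      let ans := s.1 + |ai|
      let min_abs := min s.2.2 |ai|
      (ans, minus, min_abs))
    (0, 0, 10 ^ 9)
  if st.2.1 % 2 = 0 then st.1 else st.1 - 2 * st.2.2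

-- ===== PORT B =====
def solve_alt (n : Int) (a : List Int) : Int :=
  let vals := (PySem.List.pyRange 0 n 1).map (fun i => PySem.List.pyGetD a i 0)
  let mags := PySem.List.sorted (vals.map (fun v => |v|)) (fun x => x) false
  let neg := vals.foldl (fun (s : Int) v => s + (if v < 0 then 1 else 0)) 0
  if neg % 2 = 1 then
    -- mags[0]: odd negative count ⇒ vals nonempty ⇒ mags nonempty; the [] case is unreachable
    (mags.foldl (· + ·) 0) - 2 * (match mags with | [] => 0 | m :: _ => m)
  else mags.foldl (· + ·) 0

-- ===== PRECONDITION & SPEC =====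
-- Pre_ excludes exactly n > len(a), where a[i] raises IndexError in both programs.
def Pre_solve (n : Int) (a : List Int) : Prop := n ≤ a.length
instance (n : Int) (a : List Int) : Decidable (Pre_solve n a) := by unfold Pre_solve; infer_instance
def pvWitness_solve : Int × List Int := (2, [1, -2])

-- When the count of negatives among a[0..n-1] is odd and every |a[i]| exceeds 10^9, A's
-- sentinel-initialised min_abs stays 10^9 so A returns ans - 2*10^9, while B subtracts twice the
-- true minimum absolute value, which is the intended answer.
def D_solve (n : Int) (a : List Int) : Prop :=
  0 < n ∧ n ≤ a.length ∧ ((a.take n.toNat).countP (fun x => decide (x < 0))) % 2 = 1 ∧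
    ∀ x ∈ a.take n.toNat, 10 ^ 9 < |x|
instance (n : Int) (a : List Int) : Decidable (D_solve n a) := by unfold D_solve; infer_instance

def Spec_solve (n : Int) (a : List Int) (out : Int) : Prop := ¬ D_solve n a → out = solve_alt n a
instance (n : Int) (a : List Int) (out : Int) : Decidable (Spec_solve n a out) := by unfold Spec_solve; infer_instance

def pvDiffWitness_solve : Int × List Int := (1, [-2000000000])
def pvDiffWitnessOut_solve : Int × Int := (0, -2000000000)

-- ===== CLAIM (what is proved, stated in full; the proofs are below) =====
def Claim_unchanged_solve : Prop := ∀ (n : Int) (a : List Int), Dom_solve n a → Pre_solve n a → Spec_solve n a (solve n a)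
def Claim_changed_solve : Prop := Dom_solve (pvDiffWitness_solve.1) (pvDiffWitness_solve.2) ∧ Pre_solve (pvDiffWitness_solve.1) (pvDiffWitness_solve.2) ∧ D_solve (pvDiffWitness_solve.1) (pvDiffWitness_solve.2) ∧ solve (pvDiffWitness_solve.1) (pvDiffWitness_solve.2) = pvDiffWitnessOut_solve.1 ∧ solve_alt (pvDiffWitness_solve.1) (pvDiffWitness_solve.2) = pvDiffWitnessOut_solve.2 ∧ pvDiffWitnessOut_solve.1 ≠ pvDiffWitnessOut_solve.2
def Claim_exact_solve : Prop := ∀ (n : Int) (a : List Int), Dom_solve n a → Pre_solve n a → D_solve n a → solve n a ≠ solve_alt n a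

-- ===== LEMMAS AND PROOFS =====

-- indices 0..n-1 into a, with 0 ≤ n ≤ len a, read off exactly the prefix a.take n.toNat
lemma map_pyGetD_take (a : List Int) (m : Nat) (h : m ≤ a.length) :
    (PySem.List.pyRange 0 (m : Int) 1).map (fun i => PySem.List.pyGetD a i 0) = a.take m := by
  induction m with
  | zero => simp [PySem.List.pyRange_one_eq_nil]
  | succ k ih =>
    rw [show ((k + 1 : Nat) : Int) = (k : Int) + 1 by push_cast; ring,
      PySem.List.pyRange_one_succ_right (by omega)]
    have hk : k < a.length := by omega
    rw [List.map_append, ih (by omega)]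
    have hget : PySem.List.pyGetD a ((k : Nat) : Int) 0 = a[k] := by
      rw [PySem.List.pyGetD_natCast, List.getD_eq_getElem?_getD, List.getElem?_eq_getElem hk]
      rfl
    rw [List.take_add_one, List.getElem?_eq_getElem hk]
    simp [hget]

lemma map_prefix (n : Int) (a : List Int) (h : n ≤ a.length) :
    (PySem.List.pyRange 0 n 1).map (fun i => PySem.List.pyGetD a i 0) = a.take n.toNat := by
  rcases le_or_gt n 0 with hn | hn
  · rw [PySem.List.pyRange_one_eq_nil hn]
    simp [Int.toNat_of_nonpos hn]
  · rw [show n = ((n.toNat : Nat) : Int) by omega]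
    exact map_pyGetD_take a n.toNat (by omega)

-- the fused triple fold of A computes sum of abs, negative count, and running min (from 10^9)
lemma foldl_split {γ : Type} (l : List γ) (f : γ → Int) (s0 : Int × Int × Int) :
    l.foldl (fun s v =>
        (s.1 + |f v|, (if f v < 0 then s.2.1 + 1 else s.2.1), min s.2.2 |f v|)) s0 =
      (s0.1 + ((l.map f).map (fun x => |x|)).sum,
       s0.2.1 + (((l.map f).countP (fun x => decide (x < 0)) : Nat) : Int),
       ((l.map f).map (fun x => |x|)).foldl min s0.2.2) := by
  induction l generalizing s0 with
  | nil => simp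
  | cons y ys ih =>
    simp only [List.foldl_cons, List.map_cons, List.countP_cons, List.sum_cons, ih]
    refine Prod.ext ?_ (Prod.ext ?_ ?_)
    · simp; ring
    · by_cases hy : f y < 0
      · simp only [hy, decide_true, if_true]
        push_cast
        ring
      · simp only [hy, decide_false, if_false]
        push_cast
        ring
    · rfl

lemma foldl_add_sum (l : List Int) (s : Int) : l.foldl (· + ·) s = s + l.sum := by
  induction l generalizing s with
  | nil => simp
  | cons y ys ih => simp [ih]; ring

lemma foldl_negcount (l : List Int) (s : Int) :
    l.foldl (fun s v => s + (if v < 0 then 1 else 0)) s =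
      s + ((l.countP (fun x => decide (x < 0)) : Nat) : Int) := by
  induction l generalizing s with
  | nil => simp
  | cons y ys ih =>
    simp only [List.foldl_cons, List.countP_cons, ih]
    by_cases hy : y < 0
    · simp only [hy, decide_true, if_true]
      push_cast
      ring
    · simp only [hy, decide_false, if_false]
      push_cast
      ring

-- a fold of min from c over a list containing a global minimum m collapses to min c m
lemma foldl_min_eq (l : List Int) (c m : Int) (hm : m ∈ l) (hle : ∀ y ∈ l, m ≤ y) :
    l.foldl min c = min c m := by
  apply le_antisymm
  · exact le_min (PySem.List.foldl_min_le l c).1 ((PySem.List.foldl_min_le l c).2 m hm)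
  · rcases PySem.List.foldl_min_mem l c with he | hin
    · rw [he]; exact min_le_left _ _
    · exact le_trans (min_le_right _ _) (hle _ hin)

lemma solve_char (n : Int) (a : List Int) (h : n ≤ a.length) :
    solve n a =
      (if (((a.take n.toNat).countP (fun x => decide (x < 0)) : Nat) : Int) % 2 = 0
       then ((a.take n.toNat).map (fun x => |x|)).sum
       else ((a.take n.toNat).map (fun x => |x|)).sum -
         2 * ((a.take n.toNat).map (fun x => |x|)).foldl min (10 ^ 9)) := by
  have hmap := map_prefix n a h
  unfold solve
  simp only
  rw [foldl_split (PySem.List.pyRange 0 n 1) (fun i => PySem.List.pyGetD a i 0)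
      ((0 : Int), (0 : Int), (10 : Int) ^ 9), hmap]
  simp only [zero_add]

lemma alt_char (n : Int) (a : List Int) (h : n ≤ a.length) :
    solve_alt n a =
      (if (((a.take n.toNat).countP (fun x => decide (x < 0)) : Nat) : Int) % 2 = 1
       then ((a.take n.toNat).map (fun x => |x|)).sum -
         2 * (match PySem.List.sorted ((a.take n.toNat).map (fun x => |x|)) (fun x => x) false with
              | [] => 0 | m :: _ => m)
       else ((a.take n.toNat).map (fun x => |x|)).sum) := by
  have hmap := map_prefix n a h
  have hsum : (PySem.List.sorted ((a.take n.toNat).map (fun x => |x|)) (fun x => x) false).sum =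
      ((a.take n.toNat).map (fun x => |x|)).sum :=
    (PySem.List.sorted_perm _ _ _).sum_eq
  unfold solve_alt
  simp only
  rw [hmap, foldl_negcount, foldl_add_sum, hsum]
  simp only [zero_add]

lemma take_ne_nil_of_odd (n : Int) (a : List Int)
    (hodd : ((a.take n.toNat).countP (fun x => decide (x < 0))) % 2 = 1) :
    a.take n.toNat ≠ [] := by
  intro he; rw [he] at hodd; simp at hodd

lemma sorted_head_of_odd (n : Int) (a : List Int)
    (hodd : ((a.take n.toNat).countP (fun x => decide (x < 0))) % 2 = 1) :
    ∃ m t, PySem.List.sorted ((a.take n.toNat).map (fun x => |x|)) (fun x => x) false = m :: t ∧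
      m ∈ (a.take n.toNat).map (fun x => |x|) ∧
      ∀ y ∈ (a.take n.toNat).map (fun x => |x|), m ≤ y := by
  have hpne := take_ne_nil_of_odd n a hodd
  cases hs : PySem.List.sorted ((a.take n.toNat).map (fun x => |x|)) (fun x => x) false with
  | nil =>
    exfalso
    exact hpne (List.map_eq_nil_iff.mp ((PySem.List.sorted_eq_nil_iff _ _ _).mp hs))
  | cons m t =>
    refine ⟨m, t, rfl, ?_, ?_⟩
    · have : m ∈ PySem.List.sorted ((a.take n.toNat).map (fun x => |x|)) (fun x => x) false := by
        rw [hs]; exact List.mem_cons_self ..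
      exact (PySem.List.mem_sorted _ _ _ _).mp this
    · exact PySem.List.key_head_sorted_le _ _ hs

lemma main_eq (n : Int) (a : List Int) (h : Pre_solve n a) (hd : ¬ D_solve n a) :
    solve n a = solve_alt n a := by
  unfold Pre_solve at h
  rw [solve_char n a h, alt_char n a h]
  set p := a.take n.toNat with hp
  set c := p.countP (fun x => decide (x < 0)) with hc
  by_cases hpar : ((c : Nat) : Int) % 2 = 0
  · have : ¬ ((c : Nat) : Int) % 2 = 1 := by omega
    rw [if_pos hpar, if_neg this]
  · have h1 : ((c : Nat) : Int) % 2 = 1 := by omega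
    rw [if_neg hpar, if_pos h1]
    have hco : c % 2 = 1 := by omega
    obtain ⟨m, t, hs, hmem, hle⟩ := sorted_head_of_odd n a hco
    have hn : 0 < n := by
      rcases le_or_gt n 0 with hn0 | hn0
      · exfalso; exact take_ne_nil_of_odd n a hco (by simp [Int.toNat_of_nonpos hn0])
      · exact hn0
    obtain ⟨x, hx, hxle⟩ : ∃ x ∈ p, |x| ≤ 10 ^ 9 := by
      unfold D_solve at hd
      push Not at hd
      exact hd hn h hco
    rw [hs, foldl_min_eq (p.map (fun x => |x|)) (10 ^ 9) m hmem hle]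
    have hm9 : m ≤ 10 ^ 9 := le_trans (hle |x| (List.mem_map_of_mem hx)) hxle
    rw [min_eq_right hm9]

lemma main_ne (n : Int) (a : List Int) (h : Pre_solve n a) (hd : D_solve n a) :
    solve n a ≠ solve_alt n a := by
  obtain ⟨hn, hlen, hpar, hbig⟩ := hd
  unfold Pre_solve at h
  rw [solve_char n a h, alt_char n a h]
  set p := a.take n.toNat with hp
  have h1 : (((p.countP (fun x => decide (x < 0)) : Nat) : Int)) % 2 = 1 := by omega
  have h0 : ¬ (((p.countP (fun x => decide (x < 0)) : Nat) : Int)) % 2 = 0 := by omega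
  rw [if_neg h0, if_pos h1]
  obtain ⟨m, t, hs, hmem, hle⟩ := sorted_head_of_odd n a hpar
  rw [hs, foldl_min_eq (p.map (fun x => |x|)) (10 ^ 9) m hmem hle]
  have hmbig : 10 ^ 9 < m := by
    obtain ⟨z, hz, rfl⟩ := List.mem_map.mp hmem
    exact hbig z hz
  rw [min_eq_left (le_of_lt hmbig)]
  simp only [ne_eq, sub_right_inj]
  intro hc
  omega

-- ===== VERDICT (by name: the statement is the Claim_ definition above) =====
theorem solve_spec : Claim_unchanged_solve := by
  intro n a _ hpre hd
  exact main_eq n a hpre hd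

theorem solve_changed : Claim_changed_solve := by unfold Claim_changed_solve; decide

theorem solve_tight : Claim_exact_solve := by
  intro n a _ hpre hd
  exact main_ne n a hpre hd
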